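-- pv_equiv track=rewrite | github.com/MorDavid/Hashcat-MCP | hashcat_mcp_server.py | _estimate_mask_keyspace
-- ===== SOURCE A (Python) =====
-- def _estimate_mask_keyspace(mask: str) -> int:
--     """Estimate keyspace size for a mask"""
--     charset_sizes = {
--         '?l': 26,   # lowercase
--         '?u': 26,   # uppercase
--         '?d': 10,   # digits
--         '?s': 33,   # special chars
--         '?a': 95    # all printable ASCII
--     }
--
--     keyspace = 1
--     i = 0
--     while i < len(mask):
--         if i < len(mask) - 1 and mask[i:i+2] in charset_sizes:
--             keyspace *= charset_sizes[mask[i:i+2]]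
--             i += 2
--         else:
--             keyspace *= 95  # Assume any character
--             i += 1
--
--     return keyspace
-- ===== SOURCE B (Python) =====
-- import re
--
-- def _estimate_mask_keyspace(mask: str) -> int:
--     """Estimate keyspace size for a mask"""
--     sizes = {'?l': 26, '?u': 26, '?d': 10, '?s': 33, '?a': 95}
--     tokens = re.findall(r'\?[ludsa]', mask)
--     keyspace = 1
--     for t in tokens:
--         keyspace *= sizes[t]
--     return keyspace * 95 ** (len(mask) - 2 * len(tokens))
-- ===== Notes on version B (the rewrite author's own statement) =====
-- stated objective: idiomatic
-- what changed: B replaces A's manual index-stepping while loop with a single re.findall pass that extracts all mask tokens, multiplies their charset sizes, and accounts for all leftover characters at once with one closed-form power 95**(len(mask)-2*len(tokens)).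
import Mathlib
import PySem

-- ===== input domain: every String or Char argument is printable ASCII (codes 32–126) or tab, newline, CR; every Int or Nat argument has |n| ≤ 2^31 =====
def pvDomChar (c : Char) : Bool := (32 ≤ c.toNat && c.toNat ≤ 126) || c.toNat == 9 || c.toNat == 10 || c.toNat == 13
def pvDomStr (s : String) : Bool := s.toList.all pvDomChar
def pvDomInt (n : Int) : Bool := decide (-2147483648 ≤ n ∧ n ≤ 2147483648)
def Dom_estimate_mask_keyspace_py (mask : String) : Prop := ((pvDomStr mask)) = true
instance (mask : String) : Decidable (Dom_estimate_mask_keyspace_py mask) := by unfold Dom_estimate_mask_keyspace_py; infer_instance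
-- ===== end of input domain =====

-- B replaces A's index-stepping loop by one regex-style token extraction pass plus a closed-form
-- power for the leftover characters (objective: idiomatic); same values on all inputs.

-- ===== PORT A =====
-- the dict lookup `mask[i:i+2] in charset_sizes` on a two-char window, as a function of the two chars
def pvSize2 (c1 c2 : Char) : Option Int :=
  if c1 = '?' then
    if c2 = 'l' then some 26
    else if c2 = 'u' then some 26
    else if c2 = 'd' then some 10
    else if c2 = 's' then some 33
    else if c2 = 'a' then some 95
    else none
  else none

-- A's while loop: position i is the head of the remaining list, keyspace is the accumulator
def pvALoop (cs : List Char) (keyspace : Int) : Int :=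
  match cs with
  | c1 :: c2 :: rest =>
      match pvSize2 c1 c2 with
      | some v => pvALoop rest (keyspace * v)
      | none => pvALoop (c2 :: rest) (keyspace * 95)
  | _ :: rest => pvALoop rest (keyspace * 95)
  | [] => keyspace

def estimate_mask_keyspace_py (mask : String) : Int :=
  pvALoop mask.toList 1

-- ===== PORT B =====
-- re.findall(r'\?[ludsa]', mask): leftmost, non-overlapping two-char matches (exact hand port of
-- the regex scan: at each position try to match '?'+class-letter, else advance one character)
def pvFindall (cs : List Char) : List String :=
  match cs with
  | '?' :: c :: rest =>
      if c ∈ ['l', 'u', 'd', 's', 'a'] then String.ofList ['?', c] :: pvFindall rest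
      else pvFindall (c :: rest)
  | _ :: rest => pvFindall rest
  | [] => []

def pvSizesB : PySem.Dict String Int :=
  PySem.Dict.ofList [("?l", 26), ("?u", 26), ("?d", 10), ("?s", 33), ("?a", 95)]

def estimate_mask_keyspace_py_alt (mask : String) : Int :=
  let tokens := pvFindall mask.toList
  let keyspace := tokens.foldl (fun acc t => acc * (PySem.Dict.get? pvSizesB t).getD 0) 1
  keyspace * 95 ^ (mask.toList.length - 2 * tokens.length)

-- ===== PRECONDITION & SPEC =====
def Spec_estimate_mask_keyspace_py (mask : String) (out : Int) : Prop := out = estimate_mask_keyspace_py_alt mask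
instance (mask : String) (out : Int) : Decidable (Spec_estimate_mask_keyspace_py mask out) := by unfold Spec_estimate_mask_keyspace_py; infer_instance

-- ===== CLAIM (what is proved, stated in full; the proofs are below) =====
def Claim_equal_estimate_mask_keyspace_py : Prop := ∀ (mask : String), Dom_estimate_mask_keyspace_py mask → Spec_estimate_mask_keyspace_py mask (estimate_mask_keyspace_py mask)

-- ===== LEMMAS AND PROOFS =====

lemma pvFindall_cons_skip (head : Char) (rest : List Char)
    (h : ∀ (c : Char) (r : List Char), head = '?' → rest = c :: r → False) :
    pvFindall (head :: rest) = pvFindall rest := by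
  cases rest with
  | nil => rw [pvFindall.eq_def]; split <;> simp_all [pvFindall]
  | cons c2 r =>
    have hne : head ≠ '?' := fun he => h c2 r he rfl
    rw [pvFindall.eq_def]
    split <;> simp_all

lemma pvALoop_cons_skip (head : Char) (rest : List Char) (acc : Int)
    (h : ∀ (c : Char) (r : List Char), head = '?' → rest = c :: r → False) :
    pvALoop (head :: rest) acc = pvALoop rest (acc * 95) := by
  cases rest with
  | nil => rw [pvALoop.eq_def]
  | cons c2 r =>
    have hne : head ≠ '?' := fun he => h c2 r he rfl
    rw [pvALoop.eq_def]
    simp [pvSize2, hne]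

lemma pvFindall_len_le : ∀ cs : List Char, 2 * (pvFindall cs).length ≤ cs.length := by
  intro cs
  induction cs using pvFindall.induct with
  | case1 c rest h ih => simp [pvFindall, h]; omega
  | case2 c rest h ih =>
    simp only [pvFindall, if_neg h, List.length_cons] at ih ⊢; omega
  | case3 head rest h ih => rw [pvFindall_cons_skip head rest h]; simp; omega
  | case4 => simp [pvFindall]

lemma pvFoldl_mul (f : String → Int) :
    ∀ (l : List String) (x : Int),
      l.foldl (fun acc t => acc * f t) x = x * l.foldl (fun acc t => acc * f t) 1 := by
  intro l
  induction l with
  | nil => simp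
  | cons t l ih => intro x; simp only [List.foldl]; rw [ih (x * f t), ih (1 * f t)]; ring

lemma pvKey : ∀ (cs : List Char) (acc : Int),
    pvALoop cs acc =
      acc * (pvFindall cs).foldl (fun a t => a * (PySem.Dict.get? pvSizesB t).getD 0) 1 *
        95 ^ (cs.length - 2 * (pvFindall cs).length) := by
  intro cs
  induction cs using pvFindall.induct with
  | case1 c rest h ih =>
    intro acc
    have hlen : ('?' :: c :: rest).length - 2 * (pvFindall ('?' :: c :: rest)).length
        = rest.length - 2 * (pvFindall rest).length := by
      simp [pvFindall, h]; omega
    have hv : pvSize2 '?' c = some ((PySem.Dict.get? pvSizesB (String.ofList ['?', c])).getD 0) := by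
      fin_cases h <;> decide
    have hfind : pvFindall ('?' :: c :: rest) = String.ofList ['?', c] :: pvFindall rest := by
      rw [pvFindall.eq_def]; simp [h]
    rw [pvALoop.eq_def]
    simp only [hv]
    rw [ih, hlen, hfind]
    simp only [List.foldl]
    rw [pvFoldl_mul _ (pvFindall rest) (1 * _)]
    ring
  | case2 c rest h ih =>
    intro acc
    have hne : pvSize2 '?' c = none := by
      simp only [List.mem_cons, List.not_mem_nil, or_false, not_or] at h
      obtain ⟨h1, h2, h3, h4, h5⟩ := h
      simp [pvSize2, h1, h2, h3, h4, h5]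
    have hlen : 2 * (pvFindall (c :: rest)).length ≤ (c :: rest).length :=
      pvFindall_len_le _
    simp only [pvALoop, hne, pvFindall, if_neg h]
    rw [ih]
    have hexp : ('?' :: c :: rest).length - 2 * (pvFindall (c :: rest)).length
        = ((c :: rest).length - 2 * (pvFindall (c :: rest)).length) + 1 := by
      simp only [List.length_cons] at hlen ⊢; omega
    rw [hexp, pow_succ]
    ring
  | case3 head rest h ih =>
    intro acc
    have hlen : 2 * (pvFindall rest).length ≤ rest.length := pvFindall_len_le _
    rw [pvALoop_cons_skip head rest acc h, pvFindall_cons_skip head rest h, ih]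
    have hexp : (head :: rest).length - 2 * (pvFindall rest).length
        = (rest.length - 2 * (pvFindall rest).length) + 1 := by
      simp only [List.length_cons]; omega
    rw [hexp, pow_succ]
    ring
  | case4 => intro acc; simp [pvALoop, pvFindall]

-- ===== VERDICT (by name: the statement is the Claim_ definition above) =====
theorem estimate_mask_keyspace_py_spec : Claim_equal_estimate_mask_keyspace_py := by
  intro mask _
  show _ = _
  rw [estimate_mask_keyspace_py, estimate_mask_keyspace_py_alt, pvKey, one_mul]
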